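-- pv_equiv track=rewrite | github.com/AsQuiet/brief-libs | python/tables.py | normalize_table
-- ===== SOURCE A (Python) =====
-- def normalize_table(table, cols, rows, fill_value=0):
--
--     n_table = []
--
--     for y in range(len(table)):
--         if y >= rows:
--             break
--         row = table[y]
--         n_row = []
--
--         for x in range(cols):
--             if x < len(row):
--                 n_row.append(row[x])
--             else:
--                 n_row.append(fill_value)
--
--         n_table.append(n_row)
--
--     for y in range(rows - len(table)):
--
--         n_row = []
--
--         for x in range(cols):
--             n_row.append(fill_value)
--
--         n_table.append(n_row)
--
--     return n_table
-- ===== SOURCE B (Python) =====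
-- def normalize_table(table, cols, rows, fill_value=0):
--     # Allocate a blank rows x cols grid of fill_value, then overwrite the
--     # overlapping region with the source table's cells (allocate-then-overlay).
--     c = max(cols, 0)
--     r = max(rows, 0)
--     grid = [[fill_value] * c for _ in range(r)]
--     for y in range(min(r, len(table))):
--         src = table[y]
--         for x in range(min(c, len(src))):
--             grid[y][x] = src[x]
--     return grid
-- ===== Notes on version B (the rewrite author's own statement) =====
-- stated objective: alternative
-- what changed: B allocates a blank rows x cols grid filled with fill_value up front and then overwrites only the overlapping cells in place from the source table, instead of A's per-row copy-then-pad loop over range(cols) followed by a separate fill-row loop.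
import Mathlib
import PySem

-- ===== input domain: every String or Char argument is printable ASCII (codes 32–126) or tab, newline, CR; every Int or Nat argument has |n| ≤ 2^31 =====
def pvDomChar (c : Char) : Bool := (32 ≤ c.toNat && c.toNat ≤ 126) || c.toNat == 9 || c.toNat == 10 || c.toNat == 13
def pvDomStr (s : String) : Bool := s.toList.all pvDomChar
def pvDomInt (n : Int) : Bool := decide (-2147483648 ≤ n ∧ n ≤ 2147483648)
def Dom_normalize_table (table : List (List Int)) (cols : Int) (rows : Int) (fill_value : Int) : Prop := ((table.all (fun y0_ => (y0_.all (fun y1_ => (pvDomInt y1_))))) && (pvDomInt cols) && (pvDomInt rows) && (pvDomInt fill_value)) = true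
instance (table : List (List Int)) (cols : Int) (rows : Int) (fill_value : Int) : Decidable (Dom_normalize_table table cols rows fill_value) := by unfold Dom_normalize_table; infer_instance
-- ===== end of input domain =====

-- B allocates a blank rows x cols grid of fill_value and overwrites the overlapping
-- cells in place from the source table (allocate-then-overlay), instead of A's
-- per-row copy-then-pad plus a separate fill-row loop; alternative decomposition.

-- ===== PORT A =====
def aFitRow (row : List Int) (cols fill_value : Int) : List Int :=
  (PySem.List.pyRange 0 cols 1).foldl
    (fun n_row x =>
      if x < (row.length : Int) then n_row ++ [PySem.List.pyGetD row x 0]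
      else n_row ++ [fill_value]) []

def aFirstLoop (table : List (List Int)) (cols rows fill_value : Int) : List Int → List (List Int)
  | [] => []
  | y :: ys =>
    if y ≥ rows then []
    else aFitRow (PySem.List.pyGetD table y []) cols fill_value
           :: aFirstLoop table cols rows fill_value ys

def normalize_table (table : List (List Int)) (cols : Int) (rows : Int) (fill_value : Int) : List (List Int) :=
  let n_table := aFirstLoop table cols rows fill_value
    (PySem.List.pyRange 0 (PySem.List.len table) 1)
  (PySem.List.pyRange 0 (rows - PySem.List.len table) 1).foldl
    (fun acc _ =>
      acc ++ [(PySem.List.pyRange 0 cols 1).foldl (fun r _ => r ++ [fill_value]) []])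
    n_table

-- ===== PORT B =====
-- Source B's loop bounds max(cols,0), max(rows,0), min(...) are all nonnegative ints,
-- so Python's range over them is exactly List.range over the corresponding Nat;
-- grid[y][x] = src[x] is List.set at in-range Nat indices (exact).
def normalize_table_alt (table : List (List Int)) (cols : Int) (rows : Int) (fill_value : Int) : List (List Int) :=
  let c := (max cols 0).toNat
  let r := (max rows 0).toNat
  let grid := (List.range r).map (fun _ => List.replicate c fill_value)
  (List.range (min r table.length)).foldl
    (fun g y =>
      let src := table.getD y []
      (List.range (min c src.length)).foldl
        (fun g x => g.set y ((g.getD y []).set x (src.getD x 0))) g)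
    grid

-- ===== PRECONDITION & SPEC =====
def Spec_normalize_table (table : List (List Int)) (cols : Int) (rows : Int) (fill_value : Int) (out : List (List Int)) : Prop := out = normalize_table_alt table cols rows fill_value
instance (table : List (List Int)) (cols : Int) (rows : Int) (fill_value : Int) (out : List (List Int)) : Decidable (Spec_normalize_table table cols rows fill_value out) := by unfold Spec_normalize_table; infer_instance

-- ===== CLAIM (what is proved, stated in full; the proofs are below) =====
def Claim_equal_normalize_table : Prop := ∀ (table : List (List Int)) (cols : Int) (rows : Int) (fill_value : Int), Dom_normalize_table table cols rows fill_value → Spec_normalize_table table cols rows fill_value (normalize_table table cols rows fill_value)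

-- ===== LEMMAS AND PROOFS =====

-- common normal form: row y, cell x is table[y][x] where it exists, else fill
def rowNF (src : List Int) (c : Nat) (fill : Int) : List Int :=
  (List.range c).map (fun x => if x < src.length then src.getD x 0 else fill)

def tblNF (table : List (List Int)) (c r : Nat) (fill : Int) : List (List Int) :=
  (List.range r).map (fun y => rowNF (table.getD y []) c fill)

theorem rowNF_nil (c : Nat) (fill : Int) : rowNF [] c fill = List.replicate c fill := by
  simp [rowNF, List.map_const']

-- ---------- A-side ----------

theorem aFitRow_eq_rowNF (row : List Int) (cols fill : Int) :
    aFitRow row cols fill = rowNF row (max cols 0).toNat fill := by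
  unfold aFitRow
  rw [show (fun (n_row : List Int) x =>
      if x < (row.length : Int) then n_row ++ [PySem.List.pyGetD row x 0]
      else n_row ++ [fill]) = (fun n_row x =>
      n_row ++ [if x < (row.length : Int) then PySem.List.pyGetD row x 0 else fill]) by
    funext acc x; split <;> rfl]
  rw [PySem.List.foldl_append_singleton_eq_map _ _ [], PySem.List.pyRange_one, List.map_map]
  unfold rowNF
  rw [show (cols - 0).toNat = (max cols 0).toNat by omega]
  apply List.map_congr_left
  intro k _
  simp [PySem.List.pyGetD_natCast]

theorem aFirstLoop_pyRange (table : List (List Int)) (cols rows fill b : Int) :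
    ∀ (a : Int), aFirstLoop table cols rows fill (PySem.List.pyRange a b 1) =
      (PySem.List.pyRange a (min b rows) 1).map
        (fun y => aFitRow (PySem.List.pyGetD table y []) cols fill) := by
  suffices h : ∀ (n : Nat) (a : Int), (b - a).toNat ≤ n →
      aFirstLoop table cols rows fill (PySem.List.pyRange a b 1) =
      (PySem.List.pyRange a (min b rows) 1).map
        (fun y => aFitRow (PySem.List.pyGetD table y []) cols fill) from
    fun a => h (b - a).toNat a le_rfl
  intro n
  induction n with
  | zero =>
    intro a ha
    rw [PySem.List.pyRange_one_eq_nil (by omega),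
        PySem.List.pyRange_one_eq_nil (by omega : min b rows ≤ a)]
    rfl
  | succ n ih =>
    intro a ha
    by_cases hab : b ≤ a
    · rw [PySem.List.pyRange_one_eq_nil hab,
          PySem.List.pyRange_one_eq_nil (by omega : min b rows ≤ a)]
      rfl
    · push Not at hab
      rw [PySem.List.pyRange_one_cons hab]
      by_cases har : a ≥ rows
      · rw [PySem.List.pyRange_one_eq_nil (by omega : min b rows ≤ a)]
        simp [aFirstLoop, har]
      · push Not at har
        rw [PySem.List.pyRange_one_cons (by omega : a < min b rows)]
        simp only [aFirstLoop, if_neg (by omega : ¬ a ≥ rows), List.map_cons]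
        rw [ih (a + 1) (by omega)]

theorem fill_row_eq (cols fill : Int) :
    (PySem.List.pyRange 0 cols 1).foldl (fun r _ => r ++ [fill]) [] =
      List.replicate (max cols 0).toNat fill := by
  rw [PySem.List.foldl_append_singleton_eq_map (fun _ => fill), List.map_const',
      PySem.List.length_pyRange_one,
      show (cols - 0).toNat = (max cols 0).toNat by omega]
  rfl

theorem foldl_const_append {γ : Type} (l : List γ) (r : List Int) (init : List (List Int)) :
    l.foldl (fun acc _ => acc ++ [r]) init = init ++ List.replicate l.length r := by
  rw [PySem.List.foldl_append_singleton_eq_map (fun _ => r) l init, List.map_const']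

theorem A_eq_NF (table : List (List Int)) (cols rows fill : Int) :
    normalize_table table cols rows fill =
      tblNF table (max cols 0).toNat (max rows 0).toNat fill := by
  simp only [normalize_table, PySem.List.len_eq]
  rw [aFirstLoop_pyRange, foldl_const_append, fill_row_eq, PySem.List.length_pyRange_one]
  unfold tblNF
  rw [PySem.List.pyRange_one, List.map_map]
  have hmap : ∀ (k : Nat),
      ((fun y => aFitRow (PySem.List.pyGetD table y []) cols fill) ∘ fun k : Nat => (0:Int) + ↑k) k
        = rowNF (table.getD k []) (max cols 0).toNat fill := by
    intro k
    simp only [Function.comp, zero_add, PySem.List.pyGetD_natCast]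
    exact aFitRow_eq_rowNF _ cols fill
  rw [List.map_congr_left (fun k _ => hmap k)]
  by_cases hrl : rows ≤ (table.length : Int)
  · rw [show (min (table.length : Int) rows - 0).toNat = (max rows 0).toNat by omega,
        show (rows - (table.length : Int) - 0).toNat = 0 by omega]
    simp
  · push Not at hrl
    obtain ⟨d, hd⟩ : ∃ d, (max rows 0).toNat = table.length + d :=
      ⟨(max rows 0).toNat - table.length, by omega⟩
    rw [show (min (table.length : Int) rows - 0).toNat = table.length by omega,
        show (rows - (table.length : Int) - 0).toNat = d by omega,
        hd, List.range_add, List.map_append]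
    congr 1
    rw [List.map_map]
    have hc : ∀ j ∈ List.range d,
        ((fun y => rowNF (table.getD y []) (max cols 0).toNat fill) ∘ fun x => table.length + x) j
          = List.replicate (max cols 0).toNat fill := by
      intro j _
      simp only [Function.comp]
      rw [List.getD_eq_getElem?_getD, List.getElem?_eq_none (by omega)]
      exact rowNF_nil _ fill
    rw [List.map_congr_left hc, List.map_const', List.length_range]

-- ---------- B-side ----------

-- the inner mutation loop only rewrites row y
theorem inner_loop (src : List Int) (y : Nat) :
    ∀ (n : Nat) (g : List (List Int)), y < g.length →
      (List.range n).foldl (fun g x => g.set y ((g.getD y []).set x (src.getD x 0))) g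
        = g.set y ((List.range n).foldl (fun row x => row.set x (src.getD x 0)) (g.getD y [])) := by
  intro n
  induction n with
  | zero =>
    intro g hg
    simp only [List.range_zero, List.foldl_nil]
    rw [List.getD_eq_getElem?_getD, List.getElem?_eq_getElem hg]
    simp
  | succ n ih =>
    intro g hg
    rw [List.range_succ, List.foldl_append, List.foldl_append, ih g hg]
    simp only [List.foldl_cons, List.foldl_nil]
    have hR : (g.set y ((List.range n).foldl (fun row x => row.set x (src.getD x 0))
        (g.getD y []))).getD y []
        = (List.range n).foldl (fun row x => row.set x (src.getD x 0)) (g.getD y []) := by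
      rw [List.getD_eq_getElem?_getD, List.getElem?_set_self (by simpa using hg),
          Option.getD_some]
    rw [hR, List.set_set]

-- setting a prefix of indices into a blank row
theorem row_loop (src : List Int) (c : Nat) (fill : Int) :
    ∀ (n : Nat), n ≤ c →
      (List.range n).foldl (fun row x => row.set x (src.getD x 0)) (List.replicate c fill)
        = (List.range c).map (fun x => if x < n then src.getD x 0 else fill) := by
  intro n
  induction n with
  | zero => intro _; simp [List.map_const']
  | succ n ih =>
    intro hn
    rw [List.range_succ, List.foldl_append, ih (by omega)]
    simp only [List.foldl_cons, List.foldl_nil]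
    apply List.ext_getElem
    · simp
    · intro k h1 h2
      simp only [List.length_set, List.length_map, List.length_range] at h1
      rw [List.getElem_set, List.getElem_map, List.getElem_map]
      simp only [List.getElem_range]
      by_cases hk : n = k
      · subst hk; simp
      · rw [if_neg hk]
        by_cases hk2 : k < n
        · rw [if_pos hk2, if_pos (by omega)]
        · rw [if_neg hk2, if_neg (by omega)]

theorem outer_loop (table : List (List Int)) (c r : Nat) (fill : Int) :
    ∀ (m : Nat), m ≤ min r table.length →
      (List.range m).foldl
        (fun g y =>
          (List.range (min c (table.getD y []).length)).foldl
            (fun g x => g.set y ((g.getD y []).set x ((table.getD y []).getD x 0))) g)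
        ((List.range r).map (fun _ => List.replicate c fill))
      = (List.range r).map
          (fun y => if y < m then rowNF (table.getD y []) c fill else List.replicate c fill) := by
  intro m
  induction m with
  | zero => intro _; simp
  | succ m ih =>
    intro hm
    rw [List.range_succ, List.foldl_append, ih (by omega)]
    simp only [List.foldl_cons, List.foldl_nil]
    have hmr : m < r := by omega
    have hlen : m < ((List.range r).map
        (fun y => if y < m then rowNF (table.getD y []) c fill else List.replicate c fill)).length := by
      simp [hmr]
    rw [inner_loop _ m _ _ hlen]
    have hgetD : ((List.range r).map
        (fun y => if y < m then rowNF (table.getD y []) c fill else List.replicate c fill)).getD m []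
        = List.replicate c fill := by
      rw [List.getD_eq_getElem?_getD, List.getElem?_map, List.getElem?_range hmr]
      simp
    rw [hgetD, row_loop _ c fill _ (by omega)]
    apply List.ext_getElem
    · simp
    · intro k h1 h2
      simp only [List.length_set, List.length_map, List.length_range] at h1
      rw [List.getElem_set, List.getElem_map, List.getElem_map]
      simp only [List.getElem_range]
      by_cases hk : m = k
      · subst hk
        rw [if_pos rfl, if_pos (by omega)]
        unfold rowNF
        apply List.map_congr_left
        intro x hx
        have := List.mem_range.mp hx
        by_cases hxs : x < (table.getD m []).length
        · rw [if_pos (by omega), if_pos hxs]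
        · rw [if_neg (by omega), if_neg hxs]
      · rw [if_neg hk]
        by_cases hk2 : k < m
        · rw [if_pos hk2, if_pos (by omega)]
        · rw [if_neg hk2, if_neg (by omega)]

theorem B_eq_NF (table : List (List Int)) (cols rows fill : Int) :
    normalize_table_alt table cols rows fill =
      tblNF table (max cols 0).toNat (max rows 0).toNat fill := by
  simp only [normalize_table_alt]
  rw [outer_loop table (max cols 0).toNat (max rows 0).toNat fill _ le_rfl]
  unfold tblNF
  apply List.map_congr_left
  intro y hy
  have hyr := List.mem_range.mp hy
  by_cases h : y < min (max rows 0).toNat table.length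
  · rw [if_pos h]
  · rw [if_neg h]
    have : table.length ≤ y := by omega
    rw [List.getD_eq_getElem?_getD, List.getElem?_eq_none (by omega)]
    exact (rowNF_nil _ fill).symm

-- ===== VERDICT (by name: the statement is the Claim_ definition above) =====
theorem normalize_table_spec : Claim_equal_normalize_table := by
  intro table cols rows fill _
  show normalize_table table cols rows fill = normalize_table_alt table cols rows fill
  rw [A_eq_NF, B_eq_NF]
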